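-- pv_equiv track=rewrite | github.com/lovebuilt/n8n-autoscaling | custom/build.py | inject_npm
-- ===== SOURCE A (Python) =====
-- def inject_npm(content, packages):
--     """Add custom npm packages to the pnpm add block."""
--     if not packages:
--         return content
--     lines = content.split('\n')
--     result = []
--     in_pnpm = False
--     for line in lines:
--         if 'pnpm add' in line:
--             in_pnpm = True
--         if in_pnpm and not line.rstrip().endswith('\\'):
--             result.append(line.rstrip() + ' \\')
--             result.append('    # NOTE: pdf-poppler excluded — calls process.exit(1), kills runner')
--             result.append('    # === YOUR CUSTOM NPM PACKAGES ===')
--             for i, pkg in enumerate(packages):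
--                 suffix = ' \\' if i < len(packages) - 1 else ''
--                 result.append(f'    {pkg}{suffix}')
--             in_pnpm = False
--             continue
--         result.append(line)
--     return '\n'.join(result)
-- ===== SOURCE B (Python) =====
-- NOTE_LINE = '    # NOTE: pdf-poppler excluded — calls process.exit(1), kills runner'
-- HEADER_LINE = '    # === YOUR CUSTOM NPM PACKAGES ==='
--
--
-- def _is_cont(line):
--     """Line is a backslash-continuation line."""
--     return line.rstrip().endswith('\\')
--
--
-- def inject_npm(content, packages):
--     """Add custom npm packages to the pnpm add block.
--
--     Staged: (1) mark each line that is reachable from a 'pnpm add' marker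
--     through an unbroken chain of backslash continuations; (2) stateless
--     per-line substitution: a reachable non-continuation line (the block's
--     terminal) expands to itself plus the injected block, any other line
--     maps to itself.
--     """
--     if not packages:
--         return content
--     lines = content.split('\n')
--     # stage 1: reachability vector (a non-continuation line breaks the chain
--     # by itself, so no reset logic is needed)
--     reach = []
--     for line in lines:
--         prev = bool(reach) and reach[-1] and _is_cont(lines[len(reach) - 1])
--         reach.append('pnpm add' in line or prev)
--     # the injected block, built once
--     block = [NOTE_LINE, HEADER_LINE] \
--         + ['    ' + p + ' \\' for p in packages[:-1]] \
--         + ['    ' + packages[-1]]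
--     # stage 2: per-line substitution
--     out = [x
--            for line, r in zip(lines, reach)
--            for x in ([line.rstrip() + ' \\'] + block
--                      if r and not _is_cont(line) else [line])]
--     return '\n'.join(out)
-- ===== Notes on version B (the rewrite author's own statement) =====
-- stated objective: alternative
-- what changed: Replaced A's flag-threaded single pass (in_pnpm boolean set by markers and reset inside the output loop) with two staged passes: first a pure reachability recurrence marks each line connected to a 'pnpm add' marker through backslash continuations (no reset logic), then a stateless per-line flatMap substitution expands each reachable non-continuation line into itself plus the pre-built injection block.
import Mathlib
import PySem

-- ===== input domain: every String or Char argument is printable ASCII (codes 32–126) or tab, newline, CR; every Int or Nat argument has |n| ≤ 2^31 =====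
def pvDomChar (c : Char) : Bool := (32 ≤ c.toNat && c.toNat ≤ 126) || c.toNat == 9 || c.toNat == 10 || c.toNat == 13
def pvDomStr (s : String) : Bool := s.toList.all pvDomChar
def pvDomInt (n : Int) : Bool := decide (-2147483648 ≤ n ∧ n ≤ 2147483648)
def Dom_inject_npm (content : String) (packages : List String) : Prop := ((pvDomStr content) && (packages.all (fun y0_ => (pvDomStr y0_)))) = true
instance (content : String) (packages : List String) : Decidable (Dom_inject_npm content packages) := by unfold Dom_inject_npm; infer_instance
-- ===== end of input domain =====

-- B replaces A's flag-threaded single pass (with in-loop reset) by two staged passes: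
-- a pure reachability recurrence over the lines, then a stateless per-line flatMap
-- substitution; same return value, objective 'alternative'.

-- ===== PORT A =====
def pvNote : String := "    # NOTE: pdf-poppler excluded — calls process.exit(1), kills runner"
def pvHeader : String := "    # === YOUR CUSTOM NPM PACKAGES ==="

-- the inner 'for i, pkg in enumerate(packages)' loop of A
def pvPkgLoopA (packages : List String) : List String :=
  (PySem.List.enumerate packages).map (fun ip =>
    let suffix := if ip.1 < (packages.length : Int) - 1 then " \\" else ""
    "    " ++ ip.2 ++ suffix)

-- the 'for line in lines' loop of A, threading the in_pnpm flag
def pvLoopA (packages : List String) (inPnpm : Bool) : List String → List String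
  | [] => []
  | line :: rest =>
    let inPnpm := if PySem.Str.isIn "pnpm add" line then true else inPnpm
    if inPnpm && !(PySem.Str.endswith (PySem.Str.rstrip line) "\\") then
      (PySem.Str.rstrip line ++ " \\") :: pvNote :: pvHeader ::
        (pvPkgLoopA packages ++ pvLoopA packages false rest)
    else
      line :: pvLoopA packages inPnpm rest

def inject_npm (content : String) (packages : List String) : String :=
  if packages = [] then content
  else PySem.Str.join "\n" (pvLoopA packages false ((PySem.Str.split? content "\n").getD []))

-- ===== PORT B =====
-- _is_cont: line is a backslash-continuation line
def pvIsCont (line : String) : Bool := PySem.Str.endswith (PySem.Str.rstrip line) "\\"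

-- stage 1: the reachability vector; the carried Bool is
-- 'bool(reach) and reach[-1] and _is_cont(lines[len(reach)-1])' of the next step
def pvReachB (ls : List String) (prev : Bool) : List Bool :=
  match ls with
  | [] => []
  | l :: rest =>
    let r := PySem.Str.isIn "pnpm add" l || prev
    r :: pvReachB rest (r && pvIsCont l)

-- the injected block, built once
def pvBlockB (packages : List String) : List String :=
  pvNote :: pvHeader ::
    ((packages.dropLast.map (fun p => "    " ++ p ++ " \\")) ++
      (packages.getLast?.map (fun p => "    " ++ p)).toList)

-- stage 2: per-line substitution
def pvOutB (packages : List String) (lines : List String) : List String :=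
  (lines.zip (pvReachB lines false)).flatMap (fun lr =>
    if lr.2 && !pvIsCont lr.1 then (PySem.Str.rstrip lr.1 ++ " \\") :: pvBlockB packages
    else [lr.1])

def inject_npm_alt (content : String) (packages : List String) : String :=
  if packages = [] then content
  else PySem.Str.join "\n" (pvOutB packages ((PySem.Str.split? content "\n").getD []))

-- ===== PRECONDITION & SPEC =====
def Spec_inject_npm (content : String) (packages : List String) (out : String) : Prop := out = inject_npm_alt content packages
instance (content : String) (packages : List String) (out : String) : Decidable (Spec_inject_npm content packages out) := by unfold Spec_inject_npm; infer_instance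

-- ===== CLAIM (what is proved, stated in full; the proofs are below) =====
def Claim_equal_inject_npm : Prop := ∀ (content : String) (packages : List String), Dom_inject_npm content packages → Spec_inject_npm content packages (inject_npm content packages)

-- ===== LEMMAS AND PROOFS =====

lemma pkg_aux (pk : List String) : ∀ (s : Int),
    (PySem.List.enumerate pk s).map (fun ip =>
      "    " ++ ip.2 ++ (if ip.1 < s + (pk.length : Int) - 1 then " \\" else "")) =
    (pk.dropLast.map (fun p => "    " ++ p ++ " \\")) ++
      (pk.getLast?.map (fun p => "    " ++ p)).toList := by
  induction pk with
  | nil => intro s; simp [PySem.List.enumerate_nil]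
  | cons p rest ih =>
    intro s
    rw [PySem.List.enumerate_cons, List.map_cons]
    cases rest with
    | nil => simp
    | cons q t =>
      rw [if_pos (by simp only [List.length_cons]; push_cast; omega)]
      have hrec := ih (s + 1)
      have hcond : ∀ ip1 : Int, (ip1 < s + ((p :: q :: t).length : Int) - 1) ↔
          (ip1 < s + 1 + ((q :: t).length : Int) - 1) := by
        intro ip1; simp only [List.length_cons]; push_cast; omega
      have : (PySem.List.enumerate (q :: t) (s + 1)).map (fun ip =>
          "    " ++ ip.2 ++ (if ip.1 < s + ((p :: q :: t).length : Int) - 1 then " \\" else "")) =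
          ((q :: t).dropLast.map (fun p => "    " ++ p ++ " \\")) ++
            (((q :: t).getLast?).map (fun p => "    " ++ p)).toList := by
        rw [← hrec]; simp only [hcond]
      rw [this]; simp

lemma pkg_lines_eq (pk : List String) :
    pvNote :: pvHeader :: pvPkgLoopA pk = pvBlockB pk := by
  have h := pkg_aux pk 0
  unfold pvPkgLoopA pvBlockB
  rw [← h]
  congr 2
  apply List.map_congr_left; intro ip _
  simp

lemma loop_eq (pk : List String) : ∀ (ls : List String) (c : Bool),
    pvLoopA pk c ls =
      (ls.zip (pvReachB ls c)).flatMap (fun lr =>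
        if lr.2 && !pvIsCont lr.1 then (PySem.Str.rstrip lr.1 ++ " \\") :: pvBlockB pk
        else [lr.1]) := by
  intro ls
  induction ls with
  | nil => intro c; rfl
  | cons l rest ih =>
    intro c
    rw [pvLoopA, pvReachB]
    have hflag : (if PySem.Str.isIn "pnpm add" l then true else c)
        = (PySem.Str.isIn "pnpm add" l || c) := by
      cases PySem.Str.isIn "pnpm add" l <;> simp
    rw [hflag]
    generalize (PySem.Str.isIn "pnpm add" l || c) = r
    rw [List.zip_cons_cons, List.flatMap_cons]
    cases hc : pvIsCont l with
    | true =>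
      have hc' : PySem.Str.endswith (PySem.Str.rstrip l) "\\" = true := hc
      simp only [hc', Bool.not_true, Bool.and_false, Bool.and_true,
        Bool.false_eq_true, if_false, List.singleton_append]
      exact congrArg (l :: ·) (ih r)
    | false =>
      have hc' : PySem.Str.endswith (PySem.Str.rstrip l) "\\" = false := hc
      simp only [hc', Bool.not_false, Bool.and_true, Bool.and_false]
      cases r with
      | false =>
        rw [if_neg (by simp), if_neg (by simp), List.singleton_append]
        exact congrArg (l :: ·) (ih false)
      | true =>
        have hB : pvBlockB pk = pvNote :: pvHeader :: pvPkgLoopA pk := (pkg_lines_eq pk).symm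
        rw [if_pos rfl, if_pos rfl, ih false, hB]
        simp only [List.cons_append]

-- ===== VERDICT (by name: the statement is the Claim_ definition above) =====
theorem inject_npm_spec : Claim_equal_inject_npm := by
  intro content packages _
  unfold Spec_inject_npm inject_npm inject_npm_alt
  split_ifs with h
  · rfl
  · rw [loop_eq packages _ false]; rfl
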